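-- pv_equiv track=rewrite | github.com/dkratzert/FinalCif | finalcif/cif/cod/doi.py | get_names_from_doi
-- ===== SOURCE A (Python) =====
-- from typing import List, Dict
--
-- def get_names_from_doi(data: Dict[str, List]) -> List:
--     authors = []
--     if not data or not 'author' in data:
--         return []
--     for person in data['author']:
--         name = '{}, {}'.format(person['family'] if 'family' in person else '',
--                                person['given'] if 'given' in person else '')
--         if 'sequence' in person and person['sequence'] == 'first' and name != ', ':
--             authors.insert(0, name)
--         elif name != ', ':
--             authors.append(name)
--     return authors
-- ===== SOURCE B (Python) =====
-- from typing import List, Dict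
--
--
-- def get_names_from_doi(data: Dict[str, List]) -> List:
--     if not data or 'author' not in data:
--         return []
--     names = [('{}, {}'.format(p.get('family', ''), p.get('given', '')),
--               p.get('sequence') == 'first') for p in data['author']]
--     firsts = [n for n, first in names if first and n != ', ']
--     rest = [n for n, first in names if not first and n != ', ']
--     return list(reversed(firsts)) + rest
-- ===== Notes on version B (the rewrite author's own statement) =====
-- stated objective: simpler
-- what changed: Replaces the stateful loop with repeated insert(0)/append by two filtered comprehensions over precomputed names, returning reversed(firsts) + rest in one concatenation.
import Mathlib
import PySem

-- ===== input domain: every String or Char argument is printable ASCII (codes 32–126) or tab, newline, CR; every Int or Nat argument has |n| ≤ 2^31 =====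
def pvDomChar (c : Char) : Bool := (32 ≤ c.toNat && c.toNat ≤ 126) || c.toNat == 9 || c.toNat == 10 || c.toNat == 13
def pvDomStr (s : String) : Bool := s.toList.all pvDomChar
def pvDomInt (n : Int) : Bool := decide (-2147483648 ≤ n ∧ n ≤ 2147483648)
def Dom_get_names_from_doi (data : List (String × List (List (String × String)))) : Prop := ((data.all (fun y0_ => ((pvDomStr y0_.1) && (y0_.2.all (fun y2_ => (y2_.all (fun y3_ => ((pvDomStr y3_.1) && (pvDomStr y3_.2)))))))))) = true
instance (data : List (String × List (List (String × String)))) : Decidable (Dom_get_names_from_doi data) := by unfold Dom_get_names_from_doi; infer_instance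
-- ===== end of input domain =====

-- B replaces A's stateful loop (insert(0)/append) with two filtered comprehensions over precomputed
-- names, returned as reversed(firsts) ++ rest — a simpler decomposition with the same result.


-- ===== PORT A =====
-- name = '{family}, {given}' with the ''-defaults (shared by both ports, each Python computes it identically)
def pvName (person : List (String × String)) : String :=
  (PySem.Dict.getD (PySem.Dict.mk person) "family" "") ++ ", " ++
    (PySem.Dict.getD (PySem.Dict.mk person) "given" "")

def pvStep (authors : List String) (person : List (String × String)) : List String :=
  let name := pvName person
  if (PySem.Dict.mk person).get? "sequence" = some "first" ∧ name ≠ ", " then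
    name :: authors
  else if name ≠ ", " then
    authors ++ [name]
  else authors

def get_names_from_doi (data : List (String × List (List (String × String)))) : List String :=
  if data = [] ∨ (PySem.Dict.mk data).get? "author" = none then []
  else
    match (PySem.Dict.mk data).get? "author" with
    | none => []
    | some persons =>
        persons.foldl pvStep []

-- ===== PORT B =====
def get_names_from_doi_alt (data : List (String × List (List (String × String)))) : List String :=
  if data = [] ∨ (PySem.Dict.mk data).get? "author" = none then []
  else
    match (PySem.Dict.mk data).get? "author" with
    | none => []
    | some persons =>
        let names := persons.map (fun p =>
          (pvName p, (PySem.Dict.mk p).get? "sequence" == some "first"))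
        let firsts := (names.filter (fun x => x.2 && x.1 != ", ")).map Prod.fst
        let rest := (names.filter (fun x => !x.2 && x.1 != ", ")).map Prod.fst
        firsts.reverse ++ rest

-- ===== PRECONDITION & SPEC =====
def Spec_get_names_from_doi (data : List (String × List (List (String × String)))) (out : List String) : Prop := out = get_names_from_doi_alt data
instance (data : List (String × List (List (String × String)))) (out : List String) : Decidable (Spec_get_names_from_doi data out) := by unfold Spec_get_names_from_doi; infer_instance

-- ===== CLAIM (what is proved, stated in full; the proofs are below) =====
def Claim_equal_get_names_from_doi : Prop := ∀ (data : List (String × List (List (String × String)))), Dom_get_names_from_doi data → Spec_get_names_from_doi data (get_names_from_doi data)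

-- ===== LEMMAS AND PROOFS =====
-- loop invariant of A's fold: every 'first' name lands at the front (reversing their order),
-- every other kept name is appended at the back
theorem pvFold_inv (persons : List (List (String × String))) (acc : List String) :
    persons.foldl pvStep acc
    = ((persons.map (fun p => (pvName p, (PySem.Dict.mk p).get? "sequence" == some "first"))).filter
        (fun x => x.2 && x.1 != ", ")).reverse.map Prod.fst
      ++ acc
      ++ ((persons.map (fun p => (pvName p, (PySem.Dict.mk p).get? "sequence" == some "first"))).filter
        (fun x => !x.2 && x.1 != ", ")).map Prod.fst := by
  induction persons generalizing acc with
  | nil => simp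
  | cons p ps ih =>
    simp only [List.foldl_cons, List.map_cons, List.filter_cons]
    rw [ih]
    by_cases hs : (PySem.Dict.mk p).get? "sequence" = some "first" <;>
      by_cases hn : pvName p = ", " <;>
      simp [pvStep, hs, hn, List.append_assoc]

-- ===== VERDICT (by name: the statement is the Claim_ definition above) =====
theorem get_names_from_doi_spec : Claim_equal_get_names_from_doi := by
  intro data _
  unfold Spec_get_names_from_doi get_names_from_doi get_names_from_doi_alt
  split_ifs with h
  · rfl
  · cases hg : (PySem.Dict.mk data).get? "author" with
    | none => exact absurd (Or.inr hg) h
    | some persons =>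
        simpa [List.map_reverse] using pvFold_inv persons []
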